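-- pv_equiv track=rewrite | github.com/JBRS307/ASD | tests/2022/test2/a/kol2a.py | extract_switch
-- ===== SOURCE A (Python) =====
-- def extract_switch(P):
--     cost = 0
--     S = []
--     for i in range(len(P)):
--         if P[i][1]:
--             S.append((P[i][0], cost, P[i][2]))
--             cost = 0
--         else:
--             cost += 1
--     return S
-- ===== SOURCE B (Python) =====
-- def extract_switch(P):
--     def go(rest):
--         for j, p in enumerate(rest):
--             if p[1]:
--                 return [(p[0], j, p[2])] + go(rest[j + 1:])
--         return []
--     return go(P)
-- ===== Notes on version B (the rewrite author's own statement) =====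
-- stated objective: alternative
-- what changed: Instead of one fold with a running cost counter, B recursively finds the next flagged entry, emits it with its offset in the remaining suffix as the gap, and recurses on the slice after it; no accumulator is carried across entries.
import Mathlib
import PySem

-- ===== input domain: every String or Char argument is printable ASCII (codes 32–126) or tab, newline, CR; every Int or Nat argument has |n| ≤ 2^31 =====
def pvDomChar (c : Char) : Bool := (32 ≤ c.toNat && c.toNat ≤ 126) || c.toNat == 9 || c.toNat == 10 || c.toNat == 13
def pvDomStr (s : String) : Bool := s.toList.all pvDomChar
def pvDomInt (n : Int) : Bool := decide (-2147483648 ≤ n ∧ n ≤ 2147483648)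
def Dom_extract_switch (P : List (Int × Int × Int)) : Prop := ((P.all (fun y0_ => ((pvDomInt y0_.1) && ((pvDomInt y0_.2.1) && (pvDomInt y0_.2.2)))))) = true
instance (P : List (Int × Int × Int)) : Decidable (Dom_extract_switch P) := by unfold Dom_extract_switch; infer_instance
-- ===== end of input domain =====

-- B replaces A's fold with a running cost counter by recursion: find the next flagged
-- entry, emit it with its offset in the current suffix as the gap, recurse on the rest
-- (objective: alternative).

-- ===== PORT A =====
-- Port of A: fold over range(len(P)); P[i] is always in range, so pyGetD is exact here.
def extract_switch (P : List (Int × Int × Int)) : List (Int × Int × Int) :=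
  ((PySem.List.pyRange 0 (PySem.List.len P) 1).foldl
    (fun (st : Int × List (Int × Int × Int)) i =>
      let p := PySem.List.pyGetD P i (0, 0, 0)
      if p.2.1 ≠ 0 then (0, st.2 ++ [(p.1, st.1, p.2.2)])
      else (st.1 + 1, st.2)) ((0 : Int), ([] : List (Int × Int × Int)))).2

-- ===== PORT B =====
-- The inner 'for j, p in enumerate(rest): if p[1]: return (j, p)' loop of Source B's go.
def esFind : List (Int × Int × Int) → Option (Nat × (Int × Int × Int))
  | [] => none
  | p :: tl => if p.2.1 ≠ 0 then some (0, p) else (esFind tl).map (fun x => (x.1 + 1, x.2))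

theorem esFind_ne_nil (rest : List (Int × Int × Int)) (x : Nat × (Int × Int × Int))
    (h : esFind rest = some x) : 0 < rest.length := by
  cases rest with
  | nil => simp [esFind] at h
  | cons a tl => simp

-- Source B's go: the inner early-return loop is esFind; rest[j+1:] with j ≥ 0 is exactly drop (j+1).
def esGo (rest : List (Int × Int × Int)) : List (Int × Int × Int) :=
  match h : esFind rest with
  | none => []
  | some (j, p) => (p.1, (j : Int), p.2.2) :: esGo (rest.drop (j + 1))
termination_by rest.length
decreasing_by
  have := esFind_ne_nil rest (j, p) h
  simp [List.length_drop]; omega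

def extract_switch_alt (P : List (Int × Int × Int)) : List (Int × Int × Int) := esGo P

-- ===== PRECONDITION & SPEC =====
def Spec_extract_switch (P : List (Int × Int × Int)) (out : List (Int × Int × Int)) : Prop := out = extract_switch_alt P
instance (P : List (Int × Int × Int)) (out : List (Int × Int × Int)) : Decidable (Spec_extract_switch P out) := by unfold Spec_extract_switch; infer_instance

-- ===== CLAIM =====
def Claim_equal_extract_switch : Prop := ∀ (P : List (Int × Int × Int)), Dom_extract_switch P → Spec_extract_switch P (extract_switch P)

-- ===== LEMMAS AND PROOFS =====
-- Proof helper: A's loop as a structural recursion carrying the cost counter.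
def esG : List (Int × Int × Int) → Int → List (Int × Int × Int)
  | [], _ => []
  | p :: tl, c => if p.2.1 ≠ 0 then (p.1, c, p.2.2) :: esG tl 0 else esG tl (c + 1)

-- A's fold (over the enumerated list) appends exactly esG Q c.
theorem foldA_eq (Q : List (Int × Int × Int)) :
    ∀ (i0 c : Int) (S : List (Int × Int × Int)),
    ((PySem.List.enumerate Q i0).foldl
      (fun (st : Int × List (Int × Int × Int)) ip =>
        if ip.2.2.1 ≠ 0 then (0, st.2 ++ [(ip.2.1, st.1, ip.2.2.2)])
        else (st.1 + 1, st.2)) (c, S)).2 = S ++ esG Q c := by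
  induction Q with
  | nil => intro i0 c S; simp [PySem.List.enumerate, esG]
  | cons hd tl ih =>
    intro i0 c S
    rw [PySem.List.enumerate_cons]
    simp only [List.foldl_cons]
    by_cases hf : hd.2.1 ≠ 0
    · rw [if_pos hf]
      rw [ih (i0 + 1) 0 (S ++ [(hd.1, c, hd.2.2)])]
      simp [esG, hf]
    · rw [if_neg hf]
      rw [ih (i0 + 1) (c + 1) S]
      simp only [esG]
      rw [if_neg hf]

-- esG satisfies the find-and-skip recurrence.
theorem esG_find (Q : List (Int × Int × Int)) : ∀ (c : Int),
    esG Q c = match esFind Q with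
      | none => []
      | some (j, p) => (p.1, c + (j : Int), p.2.2) :: esG (Q.drop (j + 1)) 0 := by
  induction Q with
  | nil => intro c; simp [esG, esFind]
  | cons hd tl ih =>
    intro c
    by_cases hf : hd.2.1 ≠ 0
    · simp [esG, esFind, hf]
    · simp only [esG, esFind, if_neg hf]
      rw [ih (c + 1)]
      rcases h : esFind tl with _ | ⟨j, p⟩
      · simp
      · simp only [Option.map_some]
        have : c + 1 + (j : Int) = c + ((j : Nat) + 1 : Nat) := by push_cast; ring
        simp [this]

-- esG with counter 0 is Source B's go.
theorem esG_eq_esGo (n : Nat) : ∀ (Q : List (Int × Int × Int)), Q.length ≤ n → esG Q 0 = esGo Q := by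
  induction n with
  | zero =>
    intro Q hQ
    have : Q = [] := List.eq_nil_of_length_eq_zero (Nat.le_zero.mp hQ)
    subst this; simp [esG, esGo, esFind]
  | succ n ih =>
    intro Q hQ
    rw [esG_find, esGo]
    rcases h : esFind Q with _ | ⟨j, p⟩
    · rfl
    · simp only [zero_add]
      congr 1
      exact ih (Q.drop (j + 1)) (by simp [List.length_drop]; omega)

-- ===== VERDICT =====
theorem extract_switch_spec : Claim_equal_extract_switch := by
  intro P _
  unfold Spec_extract_switch extract_switch extract_switch_alt
  have hA :
      ((PySem.List.pyRange 0 (PySem.List.len P) 1).foldl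
        (fun (st : Int × List (Int × Int × Int)) i =>
          let p := PySem.List.pyGetD P i (0, 0, 0)
          if p.2.1 ≠ 0 then (0, st.2 ++ [(p.1, st.1, p.2.2)])
          else (st.1 + 1, st.2)) ((0 : Int), ([] : List (Int × Int × Int)))).2
      = [] ++ esG P 0 := by
    have h := foldA_eq P 0 0 []
    rw [PySem.List.enumerate_eq_map_pyRange P (0, 0, 0), List.foldl_map] at h
    exact h
  rw [hA, List.nil_append]
  exact esG_eq_esGo P.length P le_rfl
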